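-- pv_equiv track=rewrite | github.com/iamsourcer/Universidad-Python | numeros.py | num_max_average
-- ===== SOURCE A (Python) =====
-- def num_max_average(lista_digitos):
--     max = 0
--     suma = 0
--     for num in lista_digitos:
--         suma += num
--         if num > max:
--             max = num
--     return max, suma//len(lista_digitos)
-- ===== SOURCE B (Python) =====
-- def num_max_average(lista_digitos):
--     ordenados = sorted(lista_digitos, reverse=True)
--     return ordenados[0], sum(ordenados) // len(ordenados)
-- ===== Notes on version B (the rewrite author's own statement) =====
-- stated objective: alternative
-- what changed: Replaces the single accumulator pass (with its max=0 sentinel) by a sort-then-read algorithm: sort descending, the maximum is the head of the sorted list and the average is its sum over its length.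
-- intended difference: On non-empty lists whose elements are all negative, A returns 0 as the maximum (its sentinel) while B returns the actual largest element, which is the intended maximum. — e.g. on num_max_average([-2]): A returns (0, -2), B returns (-2, -2)
import Mathlib
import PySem

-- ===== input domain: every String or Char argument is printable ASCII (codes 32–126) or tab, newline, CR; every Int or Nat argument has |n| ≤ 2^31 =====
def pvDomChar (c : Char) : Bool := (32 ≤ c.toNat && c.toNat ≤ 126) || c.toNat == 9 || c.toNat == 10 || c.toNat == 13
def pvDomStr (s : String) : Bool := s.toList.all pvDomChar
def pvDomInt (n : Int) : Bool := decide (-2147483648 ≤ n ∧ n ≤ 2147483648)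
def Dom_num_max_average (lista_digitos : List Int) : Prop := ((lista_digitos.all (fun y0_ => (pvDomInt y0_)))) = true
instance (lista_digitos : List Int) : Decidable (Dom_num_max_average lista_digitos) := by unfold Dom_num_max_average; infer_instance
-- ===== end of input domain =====

-- B sorts the list descending and reads the maximum off its head (and the sum/length off the
-- sorted copy); on all-negative lists B returns the true maximum where A's 0-sentinel returns 0
-- (stated as D_ below).

-- ===== PORT A =====
def num_max_average (lista_digitos : List Int) : Int × Int :=
  -- state (max, suma), loop body: suma += num; if num > max: max = num
  let st := lista_digitos.foldl
    (fun (acc : Int × Int) num =>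
      (if num > acc.1 then num else acc.1, acc.2 + num)) ((0 : Int), (0 : Int))
  (st.1, PySem.Int.floordiv st.2 (lista_digitos.length : Int))

-- ===== PORT B =====
def num_max_average_alt (lista_digitos : List Int) : Int × Int :=
  let ordenados := PySem.List.sorted lista_digitos (fun y => y) true
  -- ordenados[0]: none only on the empty list, excluded by Pre_
  ((PySem.List.pyGet? ordenados 0).getD 0,
   PySem.Int.floordiv ordenados.sum (ordenados.length : Int))

-- ===== PRECONDITION & SPEC =====
-- Pre_ excludes only the empty list: there A raises ZeroDivisionError (and B raises IndexError).
def Pre_num_max_average (lista_digitos : List Int) : Prop := lista_digitos ≠ []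
instance (lista_digitos : List Int) : Decidable (Pre_num_max_average lista_digitos) := by
  unfold Pre_num_max_average; infer_instance
def pvWitness_num_max_average : List Int := [3, 1]

-- On non-empty lists whose elements are all negative, A returns 0 as the maximum (its sentinel)
-- while B returns the actual largest element, which is the intended maximum.
def D_num_max_average (lista_digitos : List Int) : Prop :=
  lista_digitos ≠ [] ∧ ∀ x ∈ lista_digitos, x < 0
instance (lista_digitos : List Int) : Decidable (D_num_max_average lista_digitos) := by
  unfold D_num_max_average; infer_instance

def Spec_num_max_average (lista_digitos : List Int) (out : Int × Int) : Prop :=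
  ¬ D_num_max_average lista_digitos → out = num_max_average_alt lista_digitos
instance (lista_digitos : List Int) (out : Int × Int) : Decidable (Spec_num_max_average lista_digitos out) := by
  unfold Spec_num_max_average; infer_instance

def pvDiffWitness_num_max_average : List Int := [-2]
def pvDiffWitnessOut_num_max_average : (Int × Int) × (Int × Int) := ((0, -2), (-2, -2))

-- ===== CLAIM =====
def Claim_unchanged_num_max_average : Prop :=
  ∀ (lista_digitos : List Int), Dom_num_max_average lista_digitos →
    Pre_num_max_average lista_digitos →
    Spec_num_max_average lista_digitos (num_max_average lista_digitos)
def Claim_changed_num_max_average : Prop :=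
  Dom_num_max_average (pvDiffWitness_num_max_average) ∧
  Pre_num_max_average (pvDiffWitness_num_max_average) ∧
  D_num_max_average (pvDiffWitness_num_max_average) ∧
  num_max_average (pvDiffWitness_num_max_average) = pvDiffWitnessOut_num_max_average.1 ∧
  num_max_average_alt (pvDiffWitness_num_max_average) = pvDiffWitnessOut_num_max_average.2 ∧
  pvDiffWitnessOut_num_max_average.1 ≠ pvDiffWitnessOut_num_max_average.2
def Claim_exact_num_max_average : Prop :=
  ∀ (lista_digitos : List Int), Dom_num_max_average lista_digitos →
    Pre_num_max_average lista_digitos → D_num_max_average lista_digitos →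
    num_max_average lista_digitos ≠ num_max_average_alt lista_digitos

-- ===== LEMMAS AND PROOFS =====

-- A's fold over the pair state splits into a running max and the list sum.
theorem pv_fold_split (l : List Int) (a b : Int) :
    l.foldl (fun (acc : Int × Int) num =>
      (if num > acc.1 then num else acc.1, acc.2 + num)) (a, b)
    = (l.foldl max a, b + l.sum) := by
  induction l generalizing a b with
  | nil => simp
  | cons x t ih =>
    simp only [List.foldl_cons, List.sum_cons, ih]
    have hx : (if x > a then x else a) = max a x := by split_ifs <;> omega
    rw [hx]
    simp only [Prod.mk.injEq]
    exact ⟨trivial, by ring⟩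

-- running max distributes: foldl max over (max a b) = max a (foldl max b)
theorem pv_foldl_max_max (t : List Int) (a b : Int) :
    t.foldl max (max a b) = max a (t.foldl max b) := by
  induction t generalizing b with
  | nil => simp
  | cons x s ih =>
    simp only [List.foldl_cons]
    rw [max_assoc, ih]

-- B's head-of-descending-sort is the running max of the (non-empty) list.
theorem pv_sorted_head (x : Int) (t : List Int) :
    (PySem.List.pyGet? (PySem.List.sorted (x :: t) (fun y => y) true) 0).getD 0
      = t.foldl max x := by
  have hne : PySem.List.sorted (x :: t) (fun y => y) true ≠ [] := by
    rw [Ne, PySem.List.sorted_eq_nil_iff]; exact List.cons_ne_nil _ _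
  obtain ⟨m, s, hms⟩ := List.exists_cons_of_ne_nil hne
  rw [hms]
  have hget : (PySem.List.pyGet? (m :: s) 0).getD 0 = m := by
    simp [PySem.List.pyGet?, PySem.List.pyIdx?]
  rw [hget]
  -- m is a member and an upper bound; the running max is a member and an upper bound
  have hmem : m ∈ x :: t := by
    rw [← PySem.List.mem_sorted (key := fun y => y) (rev := true), hms]; exact List.mem_cons_self
  have hub : ∀ y ∈ x :: t, y ≤ m := PySem.List.key_head_sorted_rev_ge _ _ hms
  have hfm : t.foldl max x = x ∨ t.foldl max x ∈ t := PySem.List.foldl_max_mem t x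
  have hfub := PySem.List.le_foldl_max t x
  apply le_antisymm
  · rcases List.mem_cons.mp hmem with rfl | hmt
    · exact hfub.1
    · exact hfub.2 m hmt
  · rcases hfm with he | he
    · rw [he]; exact hub x List.mem_cons_self
    · exact hub _ (List.mem_cons_of_mem _ he)

-- sorting preserves sum and length
theorem pv_sorted_sum_len (l : List Int) :
    (PySem.List.sorted l (fun y => y) true).sum = l.sum ∧
    (PySem.List.sorted l (fun y => y) true).length = l.length := by
  have hp : (PySem.List.sorted l (fun y => y) true).Perm l := PySem.List.sorted_perm l (fun y => y) true
  exact ⟨hp.sum_eq, hp.length_eq⟩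

theorem num_max_average_spec : Claim_unchanged_num_max_average := by
  intro l _ hpre hnd
  obtain ⟨x, t, rfl⟩ := List.exists_cons_of_ne_nil hpre
  simp only [num_max_average, num_max_average_alt]
  rw [pv_fold_split, pv_sorted_head, (pv_sorted_sum_len (x :: t)).1,
    (pv_sorted_sum_len (x :: t)).2]
  simp only [List.foldl_cons, List.sum_cons, Prod.mk.injEq, zero_add]
  refine ⟨?_, trivial⟩
  rw [pv_foldl_max_max]
  -- since not all elements of x :: t are negative, the running max from x is ≥ 0
  have h0 : 0 ≤ t.foldl max x := by
    by_cases hx : 0 ≤ x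
    · exact le_trans hx (PySem.List.le_foldl_max t x).1
    · have hex : ∃ z ∈ x :: t, 0 ≤ z := by
        by_contra h
        push Not at h
        exact hnd ⟨List.cons_ne_nil _ _, fun y hy => h y hy⟩
      obtain ⟨z, hz, hz0⟩ := hex
      rcases List.mem_cons.mp hz with rfl | hzt
      · exact absurd hz0 hx
      · exact le_trans hz0 ((PySem.List.le_foldl_max t x).2 z hzt)
  exact max_eq_right h0

theorem num_max_average_changed : Claim_changed_num_max_average := by
  unfold Claim_changed_num_max_average; decide

theorem num_max_average_tight : Claim_exact_num_max_average := by
  intro l _ hpre hd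
  obtain ⟨-, hneg⟩ := hd
  obtain ⟨x, t, rfl⟩ := List.exists_cons_of_ne_nil hpre
  simp only [num_max_average, num_max_average_alt]
  rw [pv_fold_split, pv_sorted_head]
  simp only [List.foldl_cons]
  intro h
  have h1 : t.foldl max (max 0 x) = t.foldl max x := congrArg Prod.fst h
  have hm : t.foldl max x = x ∨ t.foldl max x ∈ t := PySem.List.foldl_max_mem t x
  have hmax_neg : t.foldl max x < 0 := by
    rcases hm with he | he
    · rw [he]; exact hneg x (by simp)
    · exact hneg _ (List.mem_cons_of_mem _ he)
  rw [pv_foldl_max_max t 0 x, max_eq_left (le_of_lt hmax_neg)] at h1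
  omega
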